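-- pv_equiv track=rewrite | github.com/shivanshss/extra_NGS_related | learning_python_Rosalind/GLOB/GLOB.py | count_optimal_alignments
-- ===== SOURCE A (Python) =====
-- def count_optimal_alignments(s, t):
--     m = len(s)
--     n = len(t)
--
--     # Create a 2D table to store alignment counts
--     counts = [[0] * (n + 1) for _ in range(m + 1)]
--
--     # Initialize the first row and column
--     for i in range(m + 1):
--         counts[i][0] = 1
--     for j in range(n + 1):
--         counts[0][j] = 1
--
--     # Fill in the table using dynamic programming
--     for i in range(1, m + 1):
--         for j in range(1, n + 1):
--             if s[i - 1] == t[j - 1]: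
--                 counts[i][j] = counts[i - 1][j - 1]
--             else:
--                 counts[i][j] = (counts[i - 1][j] + counts[i][j - 1]) % 134217727
--
--     return counts[m][n]
-- ===== SOURCE B (Python) =====
-- MOD = 134217727
--
-- def count_optimal_alignments(s, t):
--     # Iterative memoized depth-first evaluation of the alignment-count
--     # recurrence: an explicit two-phase work stack plus a hash memo, visiting
--     # only the cells reachable from (len(s), len(t)) instead of sweeping a
--     # full table row by row.
--     memo = {}
--     goal = (len(s), len(t))
--     stack = [(goal[0], goal[1], False)]
--     while stack:
--         i, j, ready = stack.pop()
--         if i == 0 or j == 0: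
--             memo[(i, j)] = 1
--         elif ready:
--             if s[i - 1] == t[j - 1]:
--                 memo[(i, j)] = memo[(i - 1, j - 1)]
--             else:
--                 memo[(i, j)] = (memo[(i - 1, j)] + memo[(i, j - 1)]) % MOD
--         elif (i, j) not in memo:
--             stack.append((i, j, True))
--             if s[i - 1] == t[j - 1]:
--                 deps = ((i - 1, j - 1),)
--             else:
--                 deps = ((i - 1, j), (i, j - 1))
--             for d in deps:
--                 if d not in memo:
--                     stack.append((d[0], d[1], False))
--     return memo[goal]
-- ===== Notes on version B (the rewrite author's own statement) =====
-- stated objective: alternative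
-- what changed: Replaces A's bottom-up full-table sweep by an iterative memoized depth-first evaluation of the recurrence with an explicit two-phase work stack and a hash memo, computing only the cells reachable from (m, n).
import Mathlib
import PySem

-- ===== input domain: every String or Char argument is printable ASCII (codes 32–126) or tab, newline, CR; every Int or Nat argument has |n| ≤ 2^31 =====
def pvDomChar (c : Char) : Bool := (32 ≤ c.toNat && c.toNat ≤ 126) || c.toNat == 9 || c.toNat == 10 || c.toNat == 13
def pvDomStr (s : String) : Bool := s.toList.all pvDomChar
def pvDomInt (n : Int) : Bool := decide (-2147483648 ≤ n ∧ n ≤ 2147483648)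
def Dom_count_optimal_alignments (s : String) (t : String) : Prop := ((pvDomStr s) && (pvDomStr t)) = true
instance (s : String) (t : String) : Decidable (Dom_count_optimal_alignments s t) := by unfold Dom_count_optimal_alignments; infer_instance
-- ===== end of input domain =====

-- B replaces A's bottom-up full-table sweep by an iterative memoized depth-first
-- evaluation of the same recurrence (explicit two-phase work stack + hash memo);
-- same return value for every input.

-- ===== PORT A =====
-- counts[i][j] read/write on the nested list table; indices are always in range in A,
-- so List.getD/List.set/List.modify are exact here.
def pvTget (c : List (List Int)) (i j : Nat) : Int := (c.getD i []).getD j 0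
def pvTset (c : List (List Int)) (i j : Nat) (v : Int) : List (List Int) :=
  c.modify i (fun r => r.set j v)

-- literal transliteration of A; range(k) for k ≥ 0 is exactly List.range k, and
-- Python's % with the positive modulus 134217727 agrees with Int.% here.
def count_optimal_alignments (s : String) (t : String) : Int :=
  let sl := s.toList
  let tl := t.toList
  let m := sl.length
  let n := tl.length
  let counts := List.replicate (m + 1) (List.replicate (n + 1) (0 : Int))
  let counts := (List.range (m + 1)).foldl (fun c i => pvTset c i 0 1) counts
  let counts := (List.range (n + 1)).foldl (fun c j => pvTset c 0 j 1) counts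
  let counts := (List.range' 1 m).foldl (fun c i =>
    (List.range' 1 n).foldl (fun c j =>
      if sl.getD (i - 1) ' ' = tl.getD (j - 1) ' ' then
        pvTset c i j (pvTget c (i - 1) (j - 1))
      else
        pvTset c i j ((pvTget c (i - 1) j + pvTget c i (j - 1)) % 134217727)) c) counts
  pvTget counts m n

-- ===== PORT B =====
-- Source B's `deps = …` tuple (the dependencies of cell (i, j))
def pvDeps (sl tl : List Char) (i j : Nat) : List (Nat × Nat) :=
  if sl.getD (i - 1) ' ' = tl.getD (j - 1) ' ' then [(i - 1, j - 1)]
  else [(i - 1, j), (i, j - 1)]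

-- termination measure for the work-stack loop: false (unexpanded) entries weigh
-- 3·4^(i+j), true (ready) entries weigh 1
def pvWEntry : Nat × Nat × Bool → Nat
  | (i, j, false) => 3 * 4 ^ (i + j)
  | (_, _, true) => 1

def pvW (st : List (Nat × Nat × Bool)) : Nat := (st.map pvWEntry).sum

-- Source B's `for d in deps: if d not in memo: stack.append(...)` push loop
def pvPush (memo : PySem.Dict (Nat × Nat) Int) (st0 : List (Nat × Nat × Bool))
    (l : List (Nat × Nat)) : List (Nat × Nat × Bool) :=
  l.foldl (fun st d => if memo.contains d then st else (d.1, d.2, false) :: st) st0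

-- the `while stack:` loop of Source B: pop an entry, handle base / ready / memoized /
-- expand exactly as the Python does. The loop is run on a fuel bound that merely
-- makes it total: fuel = pvW of the initial stack always suffices (each iteration
-- strictly decreases pvW, proved below), so the fuel guard is never hit.
-- Memo reads use getD 0; the key is always present at those reads (proved below),
-- so this is exact.
def pvRunF (sl tl : List Char) :
    Nat → List (Nat × Nat × Bool) → PySem.Dict (Nat × Nat) Int → PySem.Dict (Nat × Nat) Int
  | _, [], memo => memo
  | 0, _, memo => memo
  | fuel + 1, (i, j, ready) :: stack, memo =>
    if i = 0 ∨ j = 0 then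
      pvRunF sl tl fuel stack (memo.insert (i, j) 1)
    else if ready then
      if sl.getD (i - 1) ' ' = tl.getD (j - 1) ' ' then
        pvRunF sl tl fuel stack (memo.insert (i, j) (memo.getD (i - 1, j - 1) 0))
      else
        pvRunF sl tl fuel stack
          (memo.insert (i, j) ((memo.getD (i - 1, j) 0 + memo.getD (i, j - 1) 0) % 134217727))
    else if memo.contains (i, j) then
      pvRunF sl tl fuel stack memo
    else
      pvRunF sl tl fuel (pvPush memo ((i, j, true) :: stack) (pvDeps sl tl i j)) memo

-- literal transliteration of Source B: memo = {}, stack = [(m, n, False)], run the loop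
-- (with its always-sufficient fuel bound), return memo[goal] (the key is always
-- present at the end, proved below; getD 0 is exact)
def count_optimal_alignments_alt (s : String) (t : String) : Int :=
  let sl := s.toList
  let tl := t.toList
  (pvRunF sl tl (pvW [(sl.length, tl.length, false)]) [(sl.length, tl.length, false)]
    PySem.Dict.empty).getD (sl.length, tl.length) 0

-- ===== PRECONDITION & SPEC =====
def Spec_count_optimal_alignments (s : String) (t : String) (out : Int) : Prop := out = count_optimal_alignments_alt s t
instance (s : String) (t : String) (out : Int) : Decidable (Spec_count_optimal_alignments s t out) := by unfold Spec_count_optimal_alignments; infer_instance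

-- ===== CLAIM (what is proved, stated in full; the proofs are below) =====
def Claim_equal_count_optimal_alignments : Prop := ∀ (s : String) (t : String), Dom_count_optimal_alignments s t → Spec_count_optimal_alignments s t (count_optimal_alignments s t)

-- ===== LEMMAS AND PROOFS =====

theorem pvW_cons (e : Nat × Nat × Bool) (st : List (Nat × Nat × Bool)) :
    pvW (e :: st) = pvWEntry e + pvW st := by simp [pvW]

theorem pvWEntry_pos (e : Nat × Nat × Bool) : 1 ≤ pvWEntry e := by
  obtain ⟨i, j, b⟩ := e
  cases b
  · have := Nat.one_le_pow (i + j) 4 (by norm_num)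
    simp only [pvWEntry]
    omega
  · simp [pvWEntry]

theorem pvW_foldl_push (memo : PySem.Dict (Nat × Nat) Int) (l : List (Nat × Nat))
    (st0 : List (Nat × Nat × Bool)) :
    pvW (pvPush memo st0 l)
      ≤ pvW st0 + (l.map (fun d => 3 * 4 ^ (d.1 + d.2))).sum := by
  unfold pvPush
  induction l generalizing st0 with
  | nil => simp
  | cons d rest ih =>
    rw [List.foldl_cons]
    split
    · have := ih st0
      simp only [List.map_cons, List.sum_cons]
      omega
    · have := ih ((d.1, d.2, false) :: st0)
      rw [pvW_cons] at this
      simp only [List.map_cons, List.sum_cons, pvWEntry] at *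
      omega

-- one expansion strictly decreases the stack weight (used for the fuel bound)
theorem pvW_expand_lt (sl tl : List Char) (memo : PySem.Dict (Nat × Nat) Int)
    (i j : Nat) (stack : List (Nat × Nat × Bool)) (hbase : ¬(i = 0 ∨ j = 0)) :
    pvW (pvPush memo ((i, j, true) :: stack) (pvDeps sl tl i j))
      < pvW ((i, j, false) :: stack) := by
  have h := pvW_foldl_push memo (pvDeps sl tl i j) ((i, j, true) :: stack)
  rw [pvW_cons] at h
  have hij : 1 ≤ i + j := by omega
  have hsum : ((pvDeps sl tl i j).map (fun d => 3 * 4 ^ (d.1 + d.2))).sum ≤ 6 * 4 ^ (i + j - 1) := by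
    unfold pvDeps
    split
    · have : (i - 1) + (j - 1) ≤ i + j - 1 := by omega
      have h4 : (4:Nat) ^ ((i - 1) + (j - 1)) ≤ 4 ^ (i + j - 1) := Nat.pow_le_pow_right (by omega) this
      simp only [List.map_cons, List.map_nil, List.sum_cons, List.sum_nil]
      omega
    · have e1 : (i - 1) + j = i + j - 1 := by omega
      have e2 : i + (j - 1) = i + j - 1 := by omega
      simp only [List.map_cons, List.map_nil, List.sum_cons, List.sum_nil, e1, e2]
      omega
  have hpow : 1 ≤ (4:Nat) ^ (i + j - 1) := Nat.one_le_pow _ _ (by omega)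
  have h4 : (4:Nat) ^ (i + j) = 4 * 4 ^ (i + j - 1) := by
    rw [← pow_succ']
    congr 1
    omega
  rw [pvW_cons]
  simp only [pvWEntry] at *
  omega


-- the common mathematical recurrence both ports compute
def pvF (sl tl : List Char) : Nat → Nat → Int
  | 0, _ => 1
  | _ + 1, 0 => 1
  | i + 1, j + 1 =>
    if sl.getD i ' ' = tl.getD j ' ' then pvF sl tl i j
    else (pvF sl tl i (j + 1) + pvF sl tl (i + 1) j) % 134217727
termination_by i j => i + j

theorem pvF_zero_left (sl tl : List Char) (j : Nat) : pvF sl tl 0 j = 1 := by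
  cases j <;> simp [pvF]

theorem pvF_zero_right (sl tl : List Char) (i : Nat) : pvF sl tl i 0 = 1 := by
  cases i <;> simp [pvF]

def pvShape (c : List (List Int)) (m n : Nat) : Prop :=
  c.length = m + 1 ∧ ∀ i < m + 1, (c.getD i []).length = n + 1

theorem pvShape_tset {tb : List (List Int)} {m n i j : Nat} (v : Int)
    (h : pvShape tb m n) : pvShape (pvTset tb i j v) m n := by
  obtain ⟨h1, h2⟩ := h
  refine ⟨by simp [pvTset, h1], fun i' hi' => ?_⟩
  have hh := h2 i' hi'
  simp only [pvTset, List.getD_eq_getElem?_getD, List.getElem?_modify] at *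
  cases hx : tb[i']? with
  | none => rw [hx] at hh; simp at hh
  | some r =>
    rw [hx] at hh
    simp only [Option.getD_some] at hh
    simp only [Option.map_eq_map, Option.map_some, Option.getD_some]
    split <;> simp_all

theorem pvTget_tset {tb : List (List Int)} {m n : Nat} (h : pvShape tb m n)
    {i j : Nat} (hi : i < m + 1) (hj : j < n + 1) (v : Int) (i' j' : Nat) :
    pvTget (pvTset tb i j v) i' j' = if i' = i ∧ j' = j then v else pvTget tb i' j' := by
  obtain ⟨h1, h2⟩ := h
  simp only [pvTget, pvTset, List.getD_eq_getElem?_getD, List.getElem?_modify]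
  cases hx : tb[i']? with
  | none =>
    have hne : ¬ (i' = i ∧ j' = j) := by
      rintro ⟨rfl, rfl⟩
      have hlt : i' < tb.length := by omega
      rw [List.getElem?_eq_getElem hlt] at hx
      exact absurd hx (by simp)
    rw [if_neg hne]
    simp
  | some r =>
    simp only [Option.map_eq_map, Option.map_some, Option.getD_some]
    by_cases hii : i = i'
    · subst hii
      have hrlen : r.length = n + 1 := by
        have := h2 i hi
        rw [List.getD_eq_getElem?_getD, hx] at this
        simpa using this
      rw [if_pos rfl]
      rw [List.getElem?_set]
      by_cases hjj : j = j'
      · subst hjj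
        rw [if_pos rfl, if_pos (by omega)]
        simp
      · rw [if_neg hjj, if_neg (fun hc => hjj hc.2.symm)]
    · rw [if_neg hii, if_neg (fun hc => hii hc.1.symm)]

-- A-side: the column-init fold
theorem pvInitCol (m n : Nat) :
    ∀ k, k ≤ m + 1 →
    pvShape ((List.range k).foldl (fun c i => pvTset c i 0 1)
      (List.replicate (m + 1) (List.replicate (n + 1) (0 : Int)))) m n ∧
    ∀ i' j', pvTget ((List.range k).foldl (fun c i => pvTset c i 0 1)
      (List.replicate (m + 1) (List.replicate (n + 1) (0 : Int)))) i' j'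
      = if i' < k ∧ j' = 0 then 1 else 0 := by
  intro k hk
  induction k with
  | zero =>
    refine ⟨⟨by simp, fun i hi => ?_⟩, fun i' j' => ?_⟩
    · simp [List.getD_eq_getElem?_getD, hi]
    · have hne : ¬ (i' < 0 ∧ j' = 0) := by omega
      rw [List.range_zero, List.foldl_nil, if_neg hne]
      by_cases h1 : i' < m + 1 <;> by_cases h2 : j' < n + 1 <;>
        simp [pvTget, List.getD_eq_getElem?_getD, h1, h2]
  | succ k ih =>
    obtain ⟨ihs, ihv⟩ := ih (by omega)
    rw [List.range_succ, List.foldl_append, List.foldl_cons, List.foldl_nil]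
    refine ⟨pvShape_tset _ ihs, fun i' j' => ?_⟩
    rw [pvTget_tset ihs (by omega) (by omega)]
    rw [ihv]
    split_ifs <;> omega

-- A-side: the row-init fold, run after the column init
theorem pvInitRow (m n : Nat) {c : List (List Int)} (hs : pvShape c m n)
    (hv : ∀ i' j', pvTget c i' j' = if i' < m + 1 ∧ j' = 0 then 1 else 0) :
    ∀ k, k ≤ n + 1 →
    pvShape ((List.range k).foldl (fun c j => pvTset c 0 j 1) c) m n ∧
    ∀ i' j', pvTget ((List.range k).foldl (fun c j => pvTset c 0 j 1) c) i' j'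
      = if i' = 0 ∧ j' < k then 1 else pvTget c i' j' := by
  intro k hk
  induction k with
  | zero => exact ⟨hs, fun i' j' => by simp⟩
  | succ k ih =>
    obtain ⟨ihs, ihv⟩ := ih (by omega)
    rw [List.range_succ, List.foldl_append, List.foldl_cons, List.foldl_nil]
    refine ⟨pvShape_tset _ ihs, fun i' j' => ?_⟩
    rw [pvTget_tset ihs (by omega) (by omega), ihv]
    split_ifs <;> first | rfl | omega

-- A-side: one inner row pass
theorem pvInnerA (sl tl : List Char) (i0 : Nat) (hi : i0 + 1 ≤ sl.length) :
    ∀ k, k ≤ tl.length → ∀ c, pvShape c sl.length tl.length →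
    (∀ i' < i0 + 1, ∀ j' ≤ tl.length, pvTget c i' j' = pvF sl tl i' j') →
    (∀ i' ≤ sl.length, pvTget c i' 0 = 1) →
    (let c' := (List.range' 1 k).foldl (fun c j =>
      if sl.getD (i0 + 1 - 1) ' ' = tl.getD (j - 1) ' ' then
        pvTset c (i0 + 1) j (pvTget c (i0 + 1 - 1) (j - 1))
      else
        pvTset c (i0 + 1) j ((pvTget c (i0 + 1 - 1) j + pvTget c (i0 + 1) (j - 1)) % 134217727)) c
     pvShape c' sl.length tl.length ∧
     (∀ i' < i0 + 1, ∀ j' ≤ tl.length, pvTget c' i' j' = pvF sl tl i' j') ∧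
     (∀ i' ≤ sl.length, pvTget c' i' 0 = 1) ∧
     (∀ j' ≤ k, pvTget c' (i0 + 1) j' = pvF sl tl (i0 + 1) j')) := by
  intro k hk c hcs hlow hcol
  induction k with
  | zero =>
    refine ⟨hcs, hlow, hcol, fun j' hj' => ?_⟩
    have : j' = 0 := by omega
    subst this
    show pvTget c (i0 + 1) 0 = pvF sl tl (i0 + 1) 0
    rw [hcol (i0 + 1) hi, pvF_zero_right]
  | succ k ih =>
    obtain ⟨ihs, ihlow, ihcol, ihrow⟩ := ih (by omega)
    rw [List.range'_concat, List.foldl_append, List.foldl_cons, List.foldl_nil]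
    have hone : 1 + 1 * k = k + 1 := by omega
    rw [hone]
    set c' := (List.range' 1 k).foldl _ c with hc'
    have hwrite : ∀ v, pvShape (pvTset c' (i0 + 1) (k + 1) v) sl.length tl.length ∧
        (∀ i' j', pvTget (pvTset c' (i0 + 1) (k + 1) v) i' j'
          = if i' = i0 + 1 ∧ j' = k + 1 then v else pvTget c' i' j') :=
      fun v => ⟨pvShape_tset _ ihs, pvTget_tset ihs (by omega) (by omega) v⟩
    have hval : (if sl.getD (i0 + 1 - 1) ' ' = tl.getD (k + 1 - 1) ' ' then
          pvTget c' (i0 + 1 - 1) (k + 1 - 1)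
        else (pvTget c' (i0 + 1 - 1) (k + 1) + pvTget c' (i0 + 1) (k + 1 - 1)) % 134217727)
        = pvF sl tl (i0 + 1) (k + 1) := by
      simp only [Nat.add_sub_cancel]
      rw [ihlow i0 (by omega) k (by omega), ihlow i0 (by omega) (k + 1) (by omega),
        ihrow k (by omega)]
      rw [pvF]
    split <;> rename_i hbr
    · obtain ⟨hws, hwv⟩ := hwrite (pvTget c' (i0 + 1 - 1) (k + 1 - 1))
      refine ⟨hws, ?_, ?_, ?_⟩
      · intro i' hi' j' hj'
        rw [hwv, if_neg (by omega), ihlow i' hi' j' hj']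
      · intro i' hi'
        rw [hwv, if_neg (by omega), ihcol i' hi']
      · intro j' hj'
        rw [hwv]
        by_cases hje : i0 + 1 = i0 + 1 ∧ j' = k + 1
        · rw [hje.2, ← hval, if_pos hbr]
          simp
        · rw [if_neg hje, ihrow j' (by omega)]
    · obtain ⟨hws, hwv⟩ := hwrite ((pvTget c' (i0 + 1 - 1) (k + 1) + pvTget c' (i0 + 1) (k + 1 - 1)) % 134217727)
      refine ⟨hws, ?_, ?_, ?_⟩
      · intro i' hi' j' hj'
        rw [hwv, if_neg (by omega), ihlow i' hi' j' hj']
      · intro i' hi'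
        rw [hwv, if_neg (by omega), ihcol i' hi']
      · intro j' hj'
        rw [hwv]
        by_cases hje : i0 + 1 = i0 + 1 ∧ j' = k + 1
        · rw [hje.2, ← hval, if_neg hbr]
          simp
        · rw [if_neg hje, ihrow j' (by omega)]

-- A-side: the outer loop over rows
theorem pvOuterA (sl tl : List Char) {c : List (List Int)}
    (hcs : pvShape c sl.length tl.length)
    (hcol : ∀ i' ≤ sl.length, pvTget c i' 0 = 1)
    (hrow0 : ∀ j' ≤ tl.length, pvTget c 0 j' = pvF sl tl 0 j') :
    ∀ k, k ≤ sl.length →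
    (let c' := (List.range' 1 k).foldl (fun c i =>
      (List.range' 1 tl.length).foldl (fun c j =>
        if sl.getD (i - 1) ' ' = tl.getD (j - 1) ' ' then
          pvTset c i j (pvTget c (i - 1) (j - 1))
        else
          pvTset c i j ((pvTget c (i - 1) j + pvTget c i (j - 1)) % 134217727)) c) c
     pvShape c' sl.length tl.length ∧
     (∀ i' ≤ sl.length, pvTget c' i' 0 = 1) ∧
     (∀ i' ≤ k, ∀ j' ≤ tl.length, pvTget c' i' j' = pvF sl tl i' j')) := by
  intro k hk
  induction k with
  | zero =>
    refine ⟨hcs, hcol, fun i' hi' j' hj' => ?_⟩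
    have : i' = 0 := by omega
    subst this
    show pvTget c 0 j' = pvF sl tl 0 j'
    exact hrow0 j' hj'
  | succ k ih =>
    obtain ⟨ihs, ihcol, ihall⟩ := ih (by omega)
    rw [List.range'_concat, List.foldl_append, List.foldl_cons, List.foldl_nil]
    have hone : 1 + 1 * k = k + 1 := by omega
    rw [hone]
    have := pvInnerA sl tl k (by omega) tl.length (le_refl _) _ ihs
      (fun i' hi' j' hj' => ihall i' (by omega) j' hj') ihcol
    obtain ⟨hs2, hlow2, hcol2, hrow2⟩ := this
    refine ⟨hs2, hcol2, fun i' hi' j' hj' => ?_⟩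
    by_cases hie : i' = k + 1
    · subst hie; exact hrow2 j' hj'
    · exact hlow2 i' (by omega) j' hj'

theorem pvA_eq_F (s t : String) :
    count_optimal_alignments s t = pvF s.toList t.toList s.toList.length t.toList.length := by
  unfold count_optimal_alignments
  simp only []
  set sl := s.toList
  set tl := t.toList
  set m := sl.length
  set n := tl.length
  obtain ⟨h1s, h1v⟩ := pvInitCol m n (m + 1) (le_refl _)
  obtain ⟨h2s, h2v⟩ := pvInitRow m n h1s h1v (n + 1) (le_refl _)
  have hcol : ∀ i' ≤ m, pvTget ((List.range (n + 1)).foldl (fun c j => pvTset c 0 j 1)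
      ((List.range (m + 1)).foldl (fun c i => pvTset c i 0 1)
        (List.replicate (m + 1) (List.replicate (n + 1) (0 : Int))))) i' 0 = 1 := by
    intro i' hi'
    rw [h2v, h1v]
    split_ifs <;> omega
  have hrow0 : ∀ j' ≤ n, pvTget ((List.range (n + 1)).foldl (fun c j => pvTset c 0 j 1)
      ((List.range (m + 1)).foldl (fun c i => pvTset c i 0 1)
        (List.replicate (m + 1) (List.replicate (n + 1) (0 : Int))))) 0 j' = pvF sl tl 0 j' := by
    intro j' hj'
    rw [h2v, if_pos ⟨rfl, by omega⟩, pvF_zero_left]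
  obtain ⟨h3s, h3col, h3all⟩ := pvOuterA sl tl h2s hcol hrow0 m (le_refl _)
  exact h3all m (le_refl _) n (le_refl _)

-- B-side invariants
def pvGood (sl tl : List Char) (memo : PySem.Dict (Nat × Nat) Int) : Prop :=
  ∀ i j v, memo.get? (i, j) = some v → v = pvF sl tl i j

-- every ready (true) entry finds each of its dependencies either already memoized
-- or scheduled above it on the stack
def pvRD (sl tl : List Char) (st : List (Nat × Nat × Bool))
    (memo : PySem.Dict (Nat × Nat) Int) : Prop :=
  ∀ pre i j post, st = pre ++ (i, j, true) :: post →
    ∀ d ∈ pvDeps sl tl i j, (memo.get? d).isSome ∨ ∃ b, (d.1, d.2, b) ∈ pre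

-- Dict helpers for the memo
theorem pvIsSome_insert (d : PySem.Dict (Nat × Nat) Int) (k k' : Nat × Nat) (v : Int)
    (h : (d.get? k').isSome) : ((d.insert k v).get? k').isSome := by
  rw [PySem.Dict.get?_insert]
  split <;> simp_all

theorem pvContains_isSome (d : PySem.Dict (Nat × Nat) Int) (k : Nat × Nat)
    (h : d.contains k = true) : (d.get? k).isSome := by
  rw [PySem.Dict.contains_eq_isSome_get?] at h
  exact h

-- the memo only grows
theorem pvRun_mono (sl tl : List Char) :
    ∀ fuel st memo, ∀ k : Nat × Nat, ((memo : PySem.Dict (Nat × Nat) Int).get? k).isSome →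
      ((pvRunF sl tl fuel st memo).get? k).isSome := by
  intro fuel
  induction fuel with
  | zero =>
    intro st memo k h
    cases st with
    | nil => exact h
    | cons e stack => exact h
  | succ fuel ih =>
    intro st memo k h
    cases st with
    | nil => rw [pvRunF]; exact h
    | cons e stack =>
      obtain ⟨i, j, ready⟩ := e
      rw [pvRunF]
      by_cases hbase : i = 0 ∨ j = 0
      · rw [if_pos hbase]
        exact ih _ _ k (pvIsSome_insert _ _ _ _ h)
      · rw [if_neg hbase]
        by_cases hrdy : ready = true
        · rw [if_pos hrdy]
          by_cases heq : sl.getD (i - 1) ' ' = tl.getD (j - 1) ' '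
          · rw [if_pos heq]
            exact ih _ _ k (pvIsSome_insert _ _ _ _ h)
          · rw [if_neg heq]
            exact ih _ _ k (pvIsSome_insert _ _ _ _ h)
        · rw [if_neg hrdy]
          by_cases hc : memo.contains (i, j) = true
          · rw [if_pos hc]
            exact ih _ _ k h
          · rw [if_neg hc]
            exact ih _ _ k h

-- popping an entry preserves the readiness invariant once the popped cell is memoized
theorem pvRD_pop {sl tl : List Char} {i j : Nat} {r : Bool}
    {stack : List (Nat × Nat × Bool)} {memo memo' : PySem.Dict (Nat × Nat) Int}
    (h : pvRD sl tl ((i, j, r) :: stack) memo)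
    (hmono : ∀ k, (memo.get? k).isSome → (memo'.get? k).isSome)
    (hij : (memo'.get? (i, j)).isSome) :
    pvRD sl tl stack memo' := by
  intro pre a b post hsplit d hd
  rcases h ((i, j, r) :: pre) a b post (by rw [hsplit]; rfl) d hd with hs | ⟨b', hb⟩
  · exact Or.inl (hmono _ hs)
  · rcases List.mem_cons.1 hb with heq | hmem
    · left
      have hd1 : d = (i, j) := by
        have h1 := congrArg Prod.fst heq
        have h2 := congrArg (fun p => p.2.1) heq
        simp at h1 h2
        exact Prod.ext h1 h2
      rw [hd1]
      exact hij
    · exact Or.inr ⟨b', hmem⟩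

-- structure of the dependency-push loop
theorem pvPush_eq (memo : PySem.Dict (Nat × Nat) Int) (st0 : List (Nat × Nat × Bool))
    (l : List (Nat × Nat)) :
    ∃ P, pvPush memo st0 l = P ++ st0 ∧
      (∀ e ∈ P, ∃ d, d ∈ l ∧ e = (d.1, d.2, false)) ∧
      (∀ d ∈ l, memo.contains d = true ∨ (d.1, d.2, false) ∈ P) := by
  induction l generalizing st0 with
  | nil => exact ⟨[], by simp [pvPush], by simp, by simp⟩
  | cons d rest ih =>
    by_cases hc : memo.contains d = true
    · obtain ⟨P, h1, h2, h3⟩ := ih st0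
      refine ⟨P, ?_, ?_, ?_⟩
      · rw [← h1]; simp [pvPush, hc]
      · intro e he
        obtain ⟨d', hd', he'⟩ := h2 e he
        exact ⟨d', List.mem_cons_of_mem _ hd', he'⟩
      · intro d' hd'
        rcases List.mem_cons.1 hd' with rfl | hm
        · exact Or.inl hc
        · exact h3 d' hm
    · obtain ⟨P, h1, h2, h3⟩ := ih ((d.1, d.2, false) :: st0)
      refine ⟨P ++ [(d.1, d.2, false)], ?_, ?_, ?_⟩
      · have : pvPush memo st0 (d :: rest) = pvPush memo ((d.1, d.2, false) :: st0) rest := by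
          simp [pvPush, hc]
        rw [this, h1]
        simp
      · intro e he
        rcases List.mem_append.1 he with hm | hm
        · obtain ⟨d', hd', he'⟩ := h2 e hm
          exact ⟨d', List.mem_cons_of_mem _ hd', he'⟩
        · simp at hm
          exact ⟨d, List.mem_cons_self, by rw [hm]⟩
      · intro d' hd'
        rcases List.mem_cons.1 hd' with rfl | hm
        · exact Or.inr (by simp)
        · rcases h3 d' hm with hcc | hmm
          · exact Or.inl hcc
          · exact Or.inr (List.mem_append_left _ hmm)

-- expanding an unmemoized cell preserves the readiness invariant
theorem pvRD_expand {sl tl : List Char} {i j : Nat} {r : Bool}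
    {stack : List (Nat × Nat × Bool)} {memo : PySem.Dict (Nat × Nat) Int}
    (h : pvRD sl tl ((i, j, r) :: stack) memo) :
    pvRD sl tl (pvPush memo ((i, j, true) :: stack) (pvDeps sl tl i j)) memo := by
  obtain ⟨P, hPeq, hPmem, hPall⟩ := pvPush_eq memo ((i, j, true) :: stack) (pvDeps sl tl i j)
  intro pre a b post hsplit d hd
  rw [hPeq] at hsplit
  rcases List.append_eq_append_iff.1 hsplit with ⟨as, ha1, ha2⟩ | ⟨cs, ha1, ha2⟩
  · -- pre = P ++ as, (i,j,true)::stack = as ++ (a,b,true)::post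
    cases as with
    | nil =>
      simp at ha2
      obtain ⟨⟨rfl, rfl, -⟩, -⟩ := ha2
      rcases hPall d hd with hc | hm
      · exact Or.inl (pvContains_isSome _ _ hc)
      · exact Or.inr ⟨false, by rw [ha1]; exact List.mem_append_left _ hm⟩
    | cons e as' =>
      rw [List.cons_append] at ha2
      obtain ⟨he, hstack⟩ := List.cons.injEq _ _ _ _ ▸ ha2
      rcases h ((i, j, r) :: as') a b post (by rw [hstack]; rfl) d hd with hs | ⟨b', hb⟩
      · exact Or.inl hs
      · rcases List.mem_cons.1 hb with heq | hmem
        · refine Or.inr ⟨true, ?_⟩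
          have hd1 : d.1 = i := by have := congrArg Prod.fst heq; simpa using this
          have hd2 : d.2 = j := by have := congrArg (fun p => p.2.1) heq; simpa using this
          rw [ha1, ← he, hd1, hd2]
          exact List.mem_append_right _ List.mem_cons_self
        · exact Or.inr ⟨b', by rw [ha1]; exact List.mem_append_right _ (List.mem_cons_of_mem _ hmem)⟩
  · -- P = pre ++ cs, (a,b,true)::post = cs ++ (i,j,true)::stack
    cases cs with
    | nil =>
      simp at ha2
      obtain ⟨⟨rfl, rfl, -⟩, -⟩ := ha2
      rcases hPall d hd with hc | hm
      · exact Or.inl (pvContains_isSome _ _ hc)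
      · refine Or.inr ⟨false, ?_⟩
        rw [ha1] at hm
        simpa using hm
    | cons e cs' =>
      rw [List.cons_append] at ha2
      have he : (a, b, true) = e := (List.cons.injEq _ _ _ _ ▸ ha2).1
      have : e ∈ P := by rw [ha1]; exact List.mem_append_right _ List.mem_cons_self
      obtain ⟨d', -, he'⟩ := hPmem e this
      rw [he'] at he
      simp at he

-- pvF unfolded at a non-base cell
theorem pvF_step (sl tl : List Char) (i j : Nat) (hi : i ≠ 0) (hj : j ≠ 0) :
    pvF sl tl i j =
      if sl.getD (i - 1) ' ' = tl.getD (j - 1) ' ' then pvF sl tl (i - 1) (j - 1)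
      else (pvF sl tl (i - 1) j + pvF sl tl i (j - 1)) % 134217727 := by
  obtain ⟨i', rfl⟩ := Nat.exists_eq_succ_of_ne_zero hi
  obtain ⟨j', rfl⟩ := Nat.exists_eq_succ_of_ne_zero hj
  rw [pvF]
  simp

theorem pvRun_spec (sl tl : List Char) :
    ∀ fuel st memo, pvW st ≤ fuel → pvGood sl tl memo → pvRD sl tl st memo →
      pvGood sl tl (pvRunF sl tl fuel st memo) ∧
      ∀ e ∈ st, ((pvRunF sl tl fuel st memo).get? (e.1, e.2.1)).isSome := by
  intro fuel
  induction fuel with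
  | zero =>
    intro st memo hW hg _
    cases st with
    | nil => exact ⟨hg, by simp⟩
    | cons e stack =>
      exfalso
      have := pvWEntry_pos e
      rw [pvW_cons] at hW
      omega
  | succ fuel ih =>
    intro st memo hW hg hrd
    cases st with
    | nil => exact ⟨hg, by simp⟩
    | cons e stack =>
      obtain ⟨i, j, ready⟩ := e
      rw [pvW_cons] at hW
      have hWs : pvW stack ≤ fuel := by
        have := pvWEntry_pos (i, j, ready)
        omega
      rw [pvRunF]
      by_cases hbase : i = 0 ∨ j = 0
      · rw [if_pos hbase]
        have hg' : pvGood sl tl (memo.insert (i, j) 1) := by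
          intro a b w hw
          rw [PySem.Dict.get?_insert] at hw
          split at hw
          · rename_i hab
            rw [Prod.mk.injEq] at hab
            obtain ⟨rfl, rfl⟩ := hab
            cases hw
            rcases hbase with rfl | rfl
            · rw [pvF_zero_left]
            · rw [pvF_zero_right]
          · exact hg a b w hw
        have hrd' := pvRD_pop hrd (fun k h => pvIsSome_insert memo (i, j) k 1 h)
          (by rw [PySem.Dict.get?_insert_self]; simp)
        obtain ⟨hgf, hmf⟩ := ih stack _ hWs hg' hrd'
        refine ⟨hgf, fun e he => ?_⟩
        rcases List.mem_cons.1 he with rfl | hm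
        · exact pvRun_mono sl tl _ _ _ _ (by rw [PySem.Dict.get?_insert_self]; simp)
        · exact hmf e hm
      · rw [if_neg hbase]
        by_cases hrdy : ready = true
        · subst hrdy
          rw [if_pos rfl]
          by_cases heq : sl.getD (i - 1) ' ' = tl.getD (j - 1) ' '
          · rw [if_pos heq]
            have hdep := hrd [] i j stack rfl (i - 1, j - 1)
              (by rw [pvDeps, if_pos heq]; simp)
            rcases hdep with hs | hfalse
            swap
            · simp at hfalse
            obtain ⟨v, hv⟩ := Option.isSome_iff_exists.1 hs
            have hgd : memo.getD (i - 1, j - 1) 0 = pvF sl tl (i - 1) (j - 1) := by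
              rw [PySem.Dict.getD_of_get?_eq_some _ _ hv]
              exact hg _ _ _ hv
            have hg' : pvGood sl tl (memo.insert (i, j) (memo.getD (i - 1, j - 1) 0)) := by
              intro a b w hw
              rw [PySem.Dict.get?_insert] at hw
              split at hw
              · rename_i hab
                rw [Prod.mk.injEq] at hab
                obtain ⟨rfl, rfl⟩ := hab
                cases hw
                rw [hgd, pvF_step sl tl _ _ (fun h => hbase (Or.inl h)) (fun h => hbase (Or.inr h)),
                  if_pos heq]
              · exact hg a b w hw
            have hrd' := pvRD_pop hrd
              (fun k h => pvIsSome_insert memo (i, j) k (memo.getD (i - 1, j - 1) 0) h)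
              (by rw [PySem.Dict.get?_insert_self]; simp)
            obtain ⟨hgf, hmf⟩ := ih stack _ hWs hg' hrd'
            refine ⟨hgf, fun e he => ?_⟩
            rcases List.mem_cons.1 he with rfl | hm
            · exact pvRun_mono sl tl _ _ _ _ (by rw [PySem.Dict.get?_insert_self]; simp)
            · exact hmf e hm
          · rw [if_neg heq]
            have hdep1 := hrd [] i j stack rfl (i - 1, j)
              (by rw [pvDeps, if_neg heq]; simp)
            have hdep2 := hrd [] i j stack rfl (i, j - 1)
              (by rw [pvDeps, if_neg heq]; simp)
            rcases hdep1 with hs1 | hfalse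
            swap
            · simp at hfalse
            rcases hdep2 with hs2 | hfalse
            swap
            · simp at hfalse
            obtain ⟨v1, hv1⟩ := Option.isSome_iff_exists.1 hs1
            obtain ⟨v2, hv2⟩ := Option.isSome_iff_exists.1 hs2
            have hgd1 : memo.getD (i - 1, j) 0 = pvF sl tl (i - 1) j := by
              rw [PySem.Dict.getD_of_get?_eq_some _ _ hv1]
              exact hg _ _ _ hv1
            have hgd2 : memo.getD (i, j - 1) 0 = pvF sl tl i (j - 1) := by
              rw [PySem.Dict.getD_of_get?_eq_some _ _ hv2]
              exact hg _ _ _ hv2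
            have hg' : pvGood sl tl (memo.insert (i, j)
                ((memo.getD (i - 1, j) 0 + memo.getD (i, j - 1) 0) % 134217727)) := by
              intro a b w hw
              rw [PySem.Dict.get?_insert] at hw
              split at hw
              · rename_i hab
                rw [Prod.mk.injEq] at hab
                obtain ⟨rfl, rfl⟩ := hab
                cases hw
                rw [hgd1, hgd2,
                  pvF_step sl tl _ _ (fun h => hbase (Or.inl h)) (fun h => hbase (Or.inr h)),
                  if_neg heq]
              · exact hg a b w hw
            have hrd' := pvRD_pop hrd
              (fun k h => pvIsSome_insert memo (i, j) k
                ((memo.getD (i - 1, j) 0 + memo.getD (i, j - 1) 0) % 134217727) h)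
              (by rw [PySem.Dict.get?_insert_self]; simp)
            obtain ⟨hgf, hmf⟩ := ih stack _ hWs hg' hrd'
            refine ⟨hgf, fun e he => ?_⟩
            rcases List.mem_cons.1 he with rfl | hm
            · exact pvRun_mono sl tl _ _ _ _ (by rw [PySem.Dict.get?_insert_self]; simp)
            · exact hmf e hm
        · rw [if_neg hrdy]
          have hready : ready = false := by
            cases ready
            · rfl
            · exact absurd rfl hrdy
          subst hready
          by_cases hc : memo.contains (i, j) = true
          · rw [if_pos hc]
            have hrd' := pvRD_pop hrd (fun k h => h) (pvContains_isSome _ _ hc)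
            obtain ⟨hgf, hmf⟩ := ih stack _ hWs hg hrd'
            refine ⟨hgf, fun e he => ?_⟩
            rcases List.mem_cons.1 he with rfl | hm
            · exact pvRun_mono sl tl _ _ _ _ (pvContains_isSome _ _ hc)
            · exact hmf e hm
          · rw [if_neg hc]
            have hWp : pvW (pvPush memo ((i, j, true) :: stack) (pvDeps sl tl i j)) ≤ fuel := by
              have := pvW_expand_lt sl tl memo i j stack hbase
              rw [pvW_cons] at this
              simp only [pvWEntry] at this hW
              omega
            have hrd' : pvRD sl tl (pvPush memo ((i, j, true) :: stack) (pvDeps sl tl i j)) memo :=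
              pvRD_expand hrd
            obtain ⟨hgf, hmf⟩ := ih _ _ hWp hg hrd'
            obtain ⟨P, hPeq, -, -⟩ := pvPush_eq memo ((i, j, true) :: stack) (pvDeps sl tl i j)
            refine ⟨hgf, fun e he => ?_⟩
            rcases List.mem_cons.1 he with rfl | hm
            · have : ((i, j, true) : Nat × Nat × Bool) ∈
                  pvPush memo ((i, j, true) :: stack) (pvDeps sl tl i j) := by
                rw [hPeq]
                exact List.mem_append_right _ List.mem_cons_self
              simpa using hmf _ this
            · have : e ∈ pvPush memo ((i, j, true) :: stack) (pvDeps sl tl i j) := by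
                rw [hPeq]
                exact List.mem_append_right _ (List.mem_cons_of_mem _ hm)
              exact hmf e this

theorem pvB_eq_F (s t : String) :
    count_optimal_alignments_alt s t = pvF s.toList t.toList s.toList.length t.toList.length := by
  unfold count_optimal_alignments_alt
  simp only []
  set sl := s.toList
  set tl := t.toList
  have hrd : pvRD sl tl [(sl.length, tl.length, false)] PySem.Dict.empty := by
    intro pre a b post hsplit
    exfalso
    cases pre with
    | nil => simp at hsplit
    | cons e pre' => cases pre' <;> simp at hsplit
  have hg : pvGood sl tl PySem.Dict.empty := by
    intro a b v hv
    rw [PySem.Dict.get?_empty] at hv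
    cases hv
  obtain ⟨hgf, hmf⟩ := pvRun_spec sl tl (pvW [(sl.length, tl.length, false)])
    [(sl.length, tl.length, false)] PySem.Dict.empty (le_refl _) hg hrd
  have hsome := hmf (sl.length, tl.length, false) (by simp)
  obtain ⟨v, hv⟩ := Option.isSome_iff_exists.1 hsome
  rw [PySem.Dict.getD_of_get?_eq_some _ _ hv]
  exact hgf _ _ _ hv

-- ===== VERDICT (by name: the statement is the Claim_ definition above) =====
theorem count_optimal_alignments_spec : Claim_equal_count_optimal_alignments := by
  intro s t _
  unfold Spec_count_optimal_alignments
  rw [pvA_eq_F, pvB_eq_F]
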